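-- pv_equiv track=rewrite | github.com/francis-de-ladu/advent_of_code | 2015/16/solution.py | part1
-- ===== SOURCE A (Python) =====
-- def read_ticker_tape():
--     return dict(
--         children=3,
--         cats=7,
--         samoyeds=2,
--         pomeranians=3,
--         akitas=0,
--         vizslas=0,
--         goldfish=5,
--         trees=3,
--         cars=2,
--         perfumes=1,
--     )
--
-- def part1(data):
--     ticker_tape = read_ticker_tape()
--     for i, aunt in enumerate(data):
--         for compound, quantity in ticker_tape.items():
--             if aunt.get(compound, quantity) != quantity:
--                 break
--         else:
--             return i + 1
-- ===== SOURCE B (Python) =====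
-- def part1(data):
--     ticker_tape = dict(
--         children=3, cats=7, samoyeds=2, pomeranians=3, akitas=0,
--         vizslas=0, goldfish=5, trees=3, cars=2, perfumes=1,
--     )
--     return next(
--         (i for i, aunt in enumerate(data, start=1)
--          if all(ticker_tape.get(k, v) == v for k, v in aunt.items())),
--         None,
--     )
-- ===== Notes on version B (the rewrite author's own statement) =====
-- stated objective: simpler
-- what changed: B replaces A's nested for-loop with break/else (scanning the ten ticker compounds and looking each up in the aunt) by a single next() over a generator whose consistency test loops over the aunt's own items with a defaulting ticker lookup; the search becomes a declarative first-match expression.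
import Mathlib
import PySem

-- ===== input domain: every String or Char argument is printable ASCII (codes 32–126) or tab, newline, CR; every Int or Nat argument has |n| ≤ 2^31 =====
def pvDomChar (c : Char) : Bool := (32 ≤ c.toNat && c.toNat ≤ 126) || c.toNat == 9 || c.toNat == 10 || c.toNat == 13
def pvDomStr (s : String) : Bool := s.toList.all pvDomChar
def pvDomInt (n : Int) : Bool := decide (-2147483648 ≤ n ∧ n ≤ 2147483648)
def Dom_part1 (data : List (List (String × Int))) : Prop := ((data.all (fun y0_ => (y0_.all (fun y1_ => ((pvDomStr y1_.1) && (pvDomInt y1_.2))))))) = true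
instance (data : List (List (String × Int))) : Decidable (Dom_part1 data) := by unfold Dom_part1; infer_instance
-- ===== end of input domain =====

-- B replaces A's nested for-loop with break/else by a first-match search (findIdx?)
-- whose consistency test loops over the aunt's own items with a defaulting ticker lookup.
-- Equivalence of the return value is proved on all inputs (both programs are total).

-- ===== PORT A =====
-- helper read_ticker_tape() of A
def readTickerTape : PySem.Dict String Int :=
  PySem.Dict.ofList [("children", 3), ("cats", 7), ("samoyeds", 2), ("pomeranians", 3),
    ("akitas", 0), ("vizslas", 0), ("goldfish", 5), ("trees", 3), ("cars", 2), ("perfumes", 1)]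

-- 'for i, aunt in enumerate(data): for compound, quantity in ticker_tape.items(): … break / else: return i+1'
-- the inner for/break/else returns i+1 iff every compound passes the test: List.all over ticker items
def part1Go (rows : List (List (String × Int))) (i : Int) : Option Int :=
  match rows with
  | [] => none
  | aunt :: rest =>
      if (readTickerTape.items.all
            (fun kv => (PySem.Dict.ofList aunt).getD kv.1 kv.2 == kv.2)) then
        some (i + 1)
      else
        part1Go rest (i + 1)

def part1 (data : List (List (String × Int))) : Option Int := part1Go data 0

-- ===== PORT B =====
def tickerTapeB : PySem.Dict String Int :=
  PySem.Dict.ofList [("children", 3), ("cats", 7), ("samoyeds", 2), ("pomeranians", 3),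
    ("akitas", 0), ("vizslas", 0), ("goldfish", 5), ("trees", 3), ("cars", 2), ("perfumes", 1)]

-- next((i for i, aunt in enumerate(data, 1) if all(ticker.get(k, v) == v for k, v in aunt.items())), None)
def part1_alt (data : List (List (String × Int))) : Option Int :=
  (data.findIdx? (fun aunt =>
      (PySem.Dict.ofList aunt).items.all (fun kv => tickerTapeB.getD kv.1 kv.2 == kv.2))).map
    (fun n => (n : Int) + 1)

-- ===== PRECONDITION & SPEC =====
def Spec_part1 (data : List (List (String × Int))) (out : Option Int) : Prop := out = part1_alt data
instance (data : List (List (String × Int))) (out : Option Int) : Decidable (Spec_part1 data out) := by unfold Spec_part1; infer_instance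

-- ===== CLAIM (what is proved, stated in full; the proofs are below) =====
def Claim_equal_part1 : Prop := ∀ (data : List (List (String × Int))), Dom_part1 data → Spec_part1 data (part1 data)

-- ===== LEMMAS AND PROOFS =====

-- one direction of the symmetry of the consistency test between two nodup-key dicts
lemma consistent_dir (A B : PySem.Dict String Int)
    (hB : B.keys.Nodup)
    (h : ∀ kv ∈ A.items, B.getD kv.1 kv.2 = kv.2) :
    ∀ kv ∈ B.items, A.getD kv.1 kv.2 = kv.2 := by
  rintro ⟨k, w⟩ hkw
  cases hA : A.get? k with
  | none => simpa using PySem.Dict.getD_of_get?_eq_none A w hA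
  | some v =>
      have hkA : (k, v) ∈ A.items := PySem.Dict.mem_items_of_get?_eq_some A hA
      have hBv := h (k, v) hkA
      have hBk : B.get? k = some w := PySem.Dict.get?_of_mem_items B hkw hB
      have hBgd : B.getD k v = w := PySem.Dict.getD_of_get?_eq_some B v hBk
      have hvw : w = v := by rw [hBgd] at hBv; exact hBv
      have : A.getD k w = v := PySem.Dict.getD_of_get?_eq_some A w hA
      simpa [hvw] using this

-- the consistency test may be driven by either dict's items
lemma consistent_comm (A B : PySem.Dict String Int)
    (hA : A.keys.Nodup) (hB : B.keys.Nodup) :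
    (A.items.all (fun kv => B.getD kv.1 kv.2 == kv.2))
      = (B.items.all (fun kv => A.getD kv.1 kv.2 == kv.2)) := by
  rw [Bool.eq_iff_iff]
  simp only [List.all_eq_true, beq_iff_eq]
  constructor
  · exact fun h => consistent_dir A B hB h
  · exact fun h => consistent_dir B A hA h

lemma match_cond_comm (aunt : List (String × Int)) :
    (readTickerTape.items.all
        (fun kv => (PySem.Dict.ofList aunt).getD kv.1 kv.2 == kv.2))
      = ((PySem.Dict.ofList aunt).items.all
          (fun kv => tickerTapeB.getD kv.1 kv.2 == kv.2)) := by
  have : tickerTapeB = readTickerTape := rfl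
  rw [this]
  exact consistent_comm readTickerTape (PySem.Dict.ofList aunt)
    (PySem.Dict.nodup_keys_ofList _) (PySem.Dict.nodup_keys_ofList _)

lemma part1Go_eq (rows : List (List (String × Int))) (i : Int) :
    part1Go rows i
      = (rows.findIdx? (fun aunt =>
            (PySem.Dict.ofList aunt).items.all
              (fun kv => tickerTapeB.getD kv.1 kv.2 == kv.2))).map
          (fun n => i + (n : Int) + 1) := by
  induction rows generalizing i with
  | nil => simp [part1Go]
  | cons aunt rest ih =>
      rw [part1Go, match_cond_comm aunt, List.findIdx?_cons]
      by_cases h : ((PySem.Dict.ofList aunt).items.all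
          (fun kv => tickerTapeB.getD kv.1 kv.2 == kv.2)) = true
      · simp [h]
      · simp only [if_neg h, ih (i + 1)]
        cases rest.findIdx? (fun aunt =>
            (PySem.Dict.ofList aunt).items.all
              (fun kv => tickerTapeB.getD kv.1 kv.2 == kv.2)) with
        | none => simp
        | some n =>
            simp only [Option.bind_eq_bind, Option.bind_some, Option.pure_def,
              Option.map_some, Option.some.injEq]
            push_cast
            ring

-- ===== VERDICT (by name: the statement is the Claim_ definition above) =====
theorem part1_spec : Claim_equal_part1 := by
  intro data _
  unfold Spec_part1 part1 part1_alt
  rw [part1Go_eq]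
  cases data.findIdx? _ with
  | none => rfl
  | some n => simp
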